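-- pv_equiv track=rewrite | github.com/ManojKumarPatnaik/practice-alg | Solution/SortedTwoLettersWord.py | solution
-- ===== SOURCE A (Python) =====
-- def solution(S):
--   """
--   Given a string S of length N consisting only of letters 'A' and/or 'B', returns the minimum number of letters that need to be deleted from S in order to obtain a string in the format "A...AB...B" (all letters 'A' occur before all letters 'B').
--
--   Args:
--     S: A string of length N consisting only of letters 'A' and/or 'B'.
--
--   Returns:
--     The minimum number of letters that need to be deleted from S in order to obtain a string in the format "A...AB...B".
--   """
--
--   # Initialize counters for 'A' and 'B'
--   countA = S.count('A')
--   countB = 0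
--
--   # Initialize the minimum deletions with the count of 'A'
--   # This corresponds to the case where we delete all 'A's
--   minDeletions = countA
--
--   for char in S:
--     if char == "A":
--       # If we encounter an 'A', we decrease the count of 'A'.
--       # 'A' at the right position so no need to be deleted.
--       countA -= 1
--     else:
--       # If we encounter a 'B', we increase the count of 'B'
--       # 'B' at the wrong position so need to be deleted
--       countB += 1
--
--     # The number of deletions is the sum of current counts of 'A' and 'B',
--     # This is number of deletions at the current position to make the correct format
--     deletions = countA + countB
--
--     # Update the minimum deletions
--     minDeletions = min(minDeletions, deletions)
--
--   return minDeletions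
-- ===== SOURCE B (Python) =====
-- def solution(S):
--   # One-pass DP: result = min deletions for the prefix so far, count_b = B's seen.
--   result = 0
--   count_b = 0
--   for char in S:
--     if char == "A":
--       result = min(result + 1, count_b)
--     else:
--       count_b += 1
--   return result
-- ===== Notes on version B (the rewrite author's own statement) =====
-- stated objective: faster
-- what changed: Replaces the count-then-scan split-point enumeration (a pre-pass counting the letter A plus a loop tracking remaining A's and seen B's) with a single-pass min-recurrence DP over prefixes keeping just two scalars.
import Mathlib
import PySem

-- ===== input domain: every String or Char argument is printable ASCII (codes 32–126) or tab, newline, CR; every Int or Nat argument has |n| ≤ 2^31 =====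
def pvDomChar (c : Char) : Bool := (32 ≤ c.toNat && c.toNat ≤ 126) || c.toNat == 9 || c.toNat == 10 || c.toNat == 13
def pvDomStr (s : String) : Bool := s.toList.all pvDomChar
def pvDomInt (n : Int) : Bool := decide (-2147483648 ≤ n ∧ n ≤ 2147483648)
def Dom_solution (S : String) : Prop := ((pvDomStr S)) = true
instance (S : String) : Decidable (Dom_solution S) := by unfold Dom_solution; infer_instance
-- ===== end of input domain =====

-- B replaces A's count-then-scan (a counting pre-pass plus a split-point loop) with a
-- single-pass two-scalar min-recurrence DP; objective: faster (constant factor, one pass).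


-- ===== PORT A =====
-- loop state: (countA, countB, minDeletions)
def solutionStepA (st : Int × Int × Int) (char : Char) : Int × Int × Int :=
  let countA := if char == 'A' then st.1 - 1 else st.1
  let countB := if char == 'A' then st.2.1 else st.2.1 + 1
  (countA, countB, min st.2.2 (countA + countB))

def solution (S : String) : Int :=
  let countA : Int := (PySem.Str.count S "A" : Int)
  (S.toList.foldl solutionStepA (countA, 0, countA)).2.2

-- ===== PORT B =====
-- loop state: (result, count_b)
def solutionStepB (st : Int × Int) (char : Char) : Int × Int :=
  if char == 'A' then (min (st.1 + 1) st.2, st.2) else (st.1, st.2 + 1)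

def solution_alt (S : String) : Int :=
  (S.toList.foldl solutionStepB (0, 0)).1

-- ===== PRECONDITION & SPEC =====
def Spec_solution (S : String) (out : Int) : Prop := out = solution_alt S
instance (S : String) (out : Int) : Decidable (Spec_solution S out) := by unfold Spec_solution; infer_instance

-- ===== CLAIM (what is proved, stated in full; the proofs are below) =====
def Claim_equal_solution : Prop := ∀ (S : String), Dom_solution S → Spec_solution S (solution S)

-- ===== LEMMAS AND PROOFS =====

lemma count_go_singleton (c : Char) :
    ∀ (l : List Char) (fuel acc : Nat), l.length ≤ fuel →
      PySem.Chars.count.go [c] fuel l acc = acc + l.count c := by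
  intro l
  induction l with
  | nil =>
      intro fuel acc _
      cases fuel <;> simp [PySem.Chars.count.go]
  | cons h t ih =>
      intro fuel acc hle
      cases fuel with
      | zero => simp at hle
      | succ n =>
          simp only [List.length_cons, Nat.succ_le_succ_iff] at hle
          rw [PySem.Chars.count.go]
          by_cases hc : h = c
          · subst hc
            simp only [List.isPrefixOf, beq_self_eq_true, Bool.true_and,
              if_true, List.length_cons, List.length_nil]
            rw [List.drop_one, List.tail_cons, ih n (acc + 1) hle]
            simp
            omega
          · have hpre : ([c].isPrefixOf (h :: t)) = false := by
              simp [List.isPrefixOf, Ne.symm hc]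
            rw [hpre, if_neg (by simp), ih n acc hle]
            simp [hc]

lemma chars_count_singleton (l : List Char) (c : Char) :
    PySem.Chars.count l [c] = l.count c := by
  simp [PySem.Chars.count, count_go_singleton c l l.length 0 le_rfl]

-- the loop invariant: A's fold, started with countA = #('A' in rest), countB = b and
-- minDeletions = countA + r, ends with minDeletions equal to B's fold started at (r, b)
lemma key_inv :
    ∀ (l : List Char) (r b : Int), r ≤ b →
      (l.foldl solutionStepA ((l.count 'A' : Int), b, (l.count 'A' : Int) + r)).2.2
        = (l.foldl solutionStepB (r, b)).1 := by
  intro l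
  induction l with
  | nil => intro r b _; simp [List.foldl]
  | cons c t ih =>
      intro r b hrb
      by_cases hc : c = 'A'
      · subst hc
        have hcnt : ((('A' :: t).count 'A' : Int)) = (t.count 'A' : Int) + 1 := by
          simp
        simp only [List.foldl_cons, solutionStepA, solutionStepB, beq_self_eq_true, if_true,
          hcnt]
        have h1 : (t.count 'A' : Int) + 1 - 1 = (t.count 'A' : Int) := by ring
        have h2 : min ((t.count 'A' : Int) + 1 + r) ((t.count 'A' : Int) + b)
            = (t.count 'A' : Int) + min (r + 1) b := by omega
        rw [h1]
        have := ih (min (r + 1) b) b (min_le_right _ _)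
        simpa [h2] using this
      · have hcnt : ((c :: t).count 'A' : Int) = (t.count 'A' : Int) := by
          simp [hc]
        have hbeq : (c == 'A') = false := by simp [hc]
        simp only [List.foldl_cons, solutionStepA, solutionStepB, hbeq, hcnt]
        have h2 : min ((t.count 'A' : Int) + r) ((t.count 'A' : Int) + (b + 1))
            = (t.count 'A' : Int) + r := by omega
        have := ih r (b + 1) (by omega)
        simpa [h2] using this

lemma solution_eq_alt (S : String) : solution S = solution_alt S := by
  unfold solution solution_alt
  have hc : (PySem.Str.count S "A" : Int) = (S.toList.count 'A' : Int) := by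
    have : PySem.Str.count S "A" = PySem.Chars.count S.toList ['A'] := by
      simp [PySem.Str.count]
    rw [this, chars_count_singleton]
  simp only [hc]
  have := key_inv S.toList 0 0 le_rfl
  simpa using this

-- ===== VERDICT (by name: the statement is the Claim_ definition above) =====
theorem solution_spec : Claim_equal_solution := by
  intro S _
  unfold Spec_solution
  exact solution_eq_alt S
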